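-- pv_equiv track=rewrite | github.com/KazKozDev/dataset-creator | backend/analytics/stats.py | _get_diversity_stats
-- ===== SOURCE A (Python) =====
-- from typing import Dict, Any, List
-- from collections import Counter
--
-- def _get_diversity_stats(examples: List[Dict[str, Any]]) -> Dict[str, Any]:
--     """Get diversity-related statistics"""
--     stats = {}
--
--     # Domain/subdomain distribution
--     if any("domain" in ex for ex in examples):
--         domains = [ex.get("domain", "unknown") for ex in examples]
--         domain_counts = Counter(domains)
--         stats["domain_distribution"] = dict(domain_counts.most_common())
--
--     if any("subdomain" in ex for ex in examples):
--         subdomains = [ex.get("subdomain", "unknown") for ex in examples]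
--         subdomain_counts = Counter(subdomains)
--         stats["subdomain_distribution"] = dict(subdomain_counts.most_common(10))
--
--     # Language distribution
--     if any("language" in ex for ex in examples):
--         languages = [ex.get("language", "unknown") for ex in examples]
--         lang_counts = Counter(languages)
--         stats["language_distribution"] = dict(lang_counts.most_common())
--
--     return stats
-- ===== SOURCE B (Python) =====
-- from typing import Dict, Any, List
-- from collections import Counter
--
-- def _get_diversity_stats(examples: List[Dict[str, Any]]) -> Dict[str, Any]:
--     """Get diversity-related statistics (single pass over the examples)."""
--     dom_counts, sub_counts, lang_counts = Counter(), Counter(), Counter()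
--     has_dom = has_sub = has_lang = False
--     for ex in examples:
--         dom_counts[ex.get("domain", "unknown")] += 1
--         sub_counts[ex.get("subdomain", "unknown")] += 1
--         lang_counts[ex.get("language", "unknown")] += 1
--         has_dom = has_dom or "domain" in ex
--         has_sub = has_sub or "subdomain" in ex
--         has_lang = has_lang or "language" in ex
--     stats = {}
--     if has_dom:
--         stats["domain_distribution"] = dict(dom_counts.most_common())
--     if has_sub:
--         stats["subdomain_distribution"] = dict(sub_counts.most_common(10))
--     if has_lang:
--         stats["language_distribution"] = dict(lang_counts.most_common())
--     return stats
-- ===== Notes on version B (the rewrite author's own statement) =====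
-- stated objective: alternative
-- what changed: Replaces A's six separate scans (an any-scan plus a list build/Counter per field) with one loop over the examples that maintains three Counters and three presence flags, assembling the result afterwards.
import Mathlib
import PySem

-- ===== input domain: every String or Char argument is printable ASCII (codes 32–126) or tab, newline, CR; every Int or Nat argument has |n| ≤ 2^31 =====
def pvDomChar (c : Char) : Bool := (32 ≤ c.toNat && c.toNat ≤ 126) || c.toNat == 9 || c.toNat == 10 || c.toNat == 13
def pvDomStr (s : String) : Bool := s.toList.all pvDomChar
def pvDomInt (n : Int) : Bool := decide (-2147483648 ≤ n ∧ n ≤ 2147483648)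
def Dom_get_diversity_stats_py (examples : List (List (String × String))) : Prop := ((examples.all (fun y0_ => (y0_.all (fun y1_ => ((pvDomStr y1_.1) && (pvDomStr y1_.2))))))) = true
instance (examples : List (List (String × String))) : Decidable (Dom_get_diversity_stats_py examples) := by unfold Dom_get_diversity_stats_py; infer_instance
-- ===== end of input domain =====

-- B replaces A's six separate scans over the examples with a single loop maintaining
-- three counters and three presence flags; same return value.


-- shared port of Python's dict get with default (first match: input dicts have unique keys)
def pyGetStr (ex : List (String × String)) (k dflt : String) : String :=
  match ex.find? (fun p => p.1 == k) with
  | some p => p.2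
  | none => dflt

-- shared port of Python's 'k in ex'
def pyHasKey (ex : List (String × String)) (k : String) : Bool :=
  ex.any (fun p => p.1 == k)

-- ===== PORT A =====
-- dict(Counter(xs).most_common()) : stable sort of the counter's items by count, descending
def aMostCommon (xs : List String) : List (String × Int) :=
  PySem.List.sorted (PySem.Dict.counter xs).items (fun kv => kv.2) true

def get_diversity_stats_py (examples : List (List (String × String))) : List (String × List (String × Int)) :=
  (if examples.any (fun ex => pyHasKey ex "domain") then
      [("domain_distribution", aMostCommon (examples.map (fun ex => pyGetStr ex "domain" "unknown")))]
    else []) ++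
  (if examples.any (fun ex => pyHasKey ex "subdomain") then
      [("subdomain_distribution", (aMostCommon (examples.map (fun ex => pyGetStr ex "subdomain" "unknown"))).take 10)]
    else []) ++
  (if examples.any (fun ex => pyHasKey ex "language") then
      [("language_distribution", aMostCommon (examples.map (fun ex => pyGetStr ex "language" "unknown")))]
    else [])

-- ===== PORT B =====
structure BAcc where
  dom : PySem.Dict String Int
  sub : PySem.Dict String Int
  lang : PySem.Dict String Int
  hasDom : Bool
  hasSub : Bool
  hasLang : Bool
deriving Repr, DecidableEq

-- one iteration of Source B's loop body
def bStep (acc : BAcc) (ex : List (String × String)) : BAcc :=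
  { dom := acc.dom.modify (pyGetStr ex "domain" "unknown") 0 (· + 1)
    sub := acc.sub.modify (pyGetStr ex "subdomain" "unknown") 0 (· + 1)
    lang := acc.lang.modify (pyGetStr ex "language" "unknown") 0 (· + 1)
    hasDom := acc.hasDom || pyHasKey ex "domain"
    hasSub := acc.hasSub || pyHasKey ex "subdomain"
    hasLang := acc.hasLang || pyHasKey ex "language" }

-- dict(c.most_common()) on an already-built counter
def bMostCommon (d : PySem.Dict String Int) : List (String × Int) :=
  PySem.List.sorted d.items (fun kv => kv.2) true

def get_diversity_stats_py_alt (examples : List (List (String × String))) : List (String × List (String × Int)) :=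
  let acc := examples.foldl bStep ⟨PySem.Dict.empty, PySem.Dict.empty, PySem.Dict.empty, false, false, false⟩
  (if acc.hasDom then [("domain_distribution", bMostCommon acc.dom)] else []) ++
  (if acc.hasSub then [("subdomain_distribution", (bMostCommon acc.sub).take 10)] else []) ++
  (if acc.hasLang then [("language_distribution", bMostCommon acc.lang)] else [])

-- ===== PRECONDITION & SPEC =====
def Spec_get_diversity_stats_py (examples : List (List (String × String))) (out : List (String × List (String × Int))) : Prop := out = get_diversity_stats_py_alt examples
instance (examples : List (List (String × String))) (out : List (String × List (String × Int))) : Decidable (Spec_get_diversity_stats_py examples out) := by unfold Spec_get_diversity_stats_py; infer_instance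

-- ===== CLAIM (what is proved, stated in full; the proofs are below) =====
def Claim_equal_get_diversity_stats_py : Prop := ∀ (examples : List (List (String × String))), Dom_get_diversity_stats_py examples → Spec_get_diversity_stats_py examples (get_diversity_stats_py examples)

-- ===== LEMMAS AND PROOFS =====

-- B's single fold splits into the three per-field counter folds and the three any-scans
lemma bFold_spec (examples : List (List (String × String))) (acc : BAcc) :
    examples.foldl bStep acc =
      ⟨ examples.foldl (fun d ex => d.modify (pyGetStr ex "domain" "unknown") 0 (· + 1)) acc.dom,
        examples.foldl (fun d ex => d.modify (pyGetStr ex "subdomain" "unknown") 0 (· + 1)) acc.sub,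
        examples.foldl (fun d ex => d.modify (pyGetStr ex "language" "unknown") 0 (· + 1)) acc.lang,
        acc.hasDom || examples.any (fun ex => pyHasKey ex "domain"),
        acc.hasSub || examples.any (fun ex => pyHasKey ex "subdomain"),
        acc.hasLang || examples.any (fun ex => pyHasKey ex "language") ⟩ := by
  induction examples generalizing acc with
  | nil => simp
  | cons x t ih => simp [ih, bStep, Bool.or_assoc]

-- ===== VERDICT (by name: the statement is the Claim_ definition above) =====
theorem get_diversity_stats_py_spec : Claim_equal_get_diversity_stats_py := by
  intro examples _
  unfold Spec_get_diversity_stats_py get_diversity_stats_py get_diversity_stats_py_alt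
  rw [bFold_spec]
  simp [aMostCommon, bMostCommon, PySem.Dict.counter_eq_foldl, List.foldl_map]
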